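-- pv_equiv track=rewrite | github.com/sabrivolkanbalaban/Keyvault | app/auth/routes.py | _map_ad_groups_to_role
-- ===== SOURCE A (Python) =====
-- def _map_ad_groups_to_role(ad_groups: list, config) -> str | None:
--     """Map AD group memberships to a local role."""
--     admin_groups = [g.strip() for g in config.get("LDAP_ADMIN_GROUPS", []) if g.strip()]
--     user_groups = [g.strip() for g in config.get("LDAP_USER_GROUPS", []) if g.strip()]
--     readonly_groups = [g.strip() for g in config.get("LDAP_READONLY_GROUPS", []) if g.strip()]
--
--     for group_dn in ad_groups:
--         if group_dn in admin_groups: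
--             return "admin"
--
--     for group_dn in ad_groups:
--         if group_dn in user_groups:
--             return "user"
--
--     for group_dn in ad_groups:
--         if group_dn in readonly_groups:
--             return "readonly"
--
--     return None
-- ===== SOURCE B (Python) =====
-- def _map_ad_groups_to_role(ad_groups: list, config) -> str | None:
--     """Map AD group memberships to a local role via a precomputed group->priority index."""
--     rank = {}
--     for key, prio in (("LDAP_READONLY_GROUPS", 1), ("LDAP_USER_GROUPS", 2), ("LDAP_ADMIN_GROUPS", 3)):
--         for g in config.get(key, []):
--             s = g.strip()
--             if s:
--                 rank[s] = prio  # later (higher-priority) tiers overwrite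
--     best = 0
--     for g in ad_groups:
--         best = max(best, rank.get(g, 0))
--     if best == 3:
--         return "admin"
--     if best == 2:
--         return "user"
--     if best == 1:
--         return "readonly"
--     return None
-- ===== Notes on version B (the rewrite author's own statement) =====
-- stated objective: alternative
-- what changed: Replaces A's three early-return scans of ad_groups against stripped tier lists by building a single group->priority dict (readonly=1,user=2,admin=3, later tiers overwrite) and taking one max-fold over ad_groups, decoding the maximum to a role.
import Mathlib
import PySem

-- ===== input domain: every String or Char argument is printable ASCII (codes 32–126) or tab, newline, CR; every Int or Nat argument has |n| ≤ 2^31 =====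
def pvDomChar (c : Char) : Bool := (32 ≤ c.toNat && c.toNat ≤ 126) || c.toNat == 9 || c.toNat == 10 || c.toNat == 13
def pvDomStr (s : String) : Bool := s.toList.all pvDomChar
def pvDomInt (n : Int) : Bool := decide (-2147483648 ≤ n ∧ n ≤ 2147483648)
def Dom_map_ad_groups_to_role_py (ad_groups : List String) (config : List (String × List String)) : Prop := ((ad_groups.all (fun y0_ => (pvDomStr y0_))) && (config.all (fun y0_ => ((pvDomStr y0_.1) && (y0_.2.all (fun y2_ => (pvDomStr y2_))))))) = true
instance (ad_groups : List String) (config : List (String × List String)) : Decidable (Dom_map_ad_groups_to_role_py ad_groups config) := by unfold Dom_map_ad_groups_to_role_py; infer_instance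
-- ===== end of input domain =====

-- B replaces A's three early-return scans over ad_groups by a group→priority dict built once from the config (readonly=1, user=2, admin=3, later tiers overwrite) and one max-fold over ad_groups; return values proved equal.
-- ===== PORT A =====
def pvClean (l : List String) : List String :=
  l.filterMap (fun g => let s := PySem.Str.strip g; if s = "" then none else some s)

def pvFindIn (gs : List String) (grp : List String) : Bool :=
  match gs with
  | [] => false
  | g :: t => if grp.contains g then true else pvFindIn t grp

def map_ad_groups_to_role_py (ad_groups : List String) (config : List (String × List String)) : Option String :=
  let cfg := PySem.Dict.mk config
  let admin_groups := pvClean (cfg.getD "LDAP_ADMIN_GROUPS" [])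
  let user_groups := pvClean (cfg.getD "LDAP_USER_GROUPS" [])
  let readonly_groups := pvClean (cfg.getD "LDAP_READONLY_GROUPS" [])
  if pvFindIn ad_groups admin_groups then some "admin"
  else if pvFindIn ad_groups user_groups then some "user"
  else if pvFindIn ad_groups readonly_groups then some "readonly"
  else none

-- ===== PORT B =====
-- inner loop: 'for g in config.get(key, []): s = g.strip(); if s: rank[s] = prio'
def pvAddTier (rank : PySem.Dict String Nat) (groups : List String) (prio : Nat) : PySem.Dict String Nat :=
  groups.foldl (fun d g => let s := PySem.Str.strip g; if s = "" then d else d.insert s prio) rank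

def map_ad_groups_to_role_py_alt (ad_groups : List String) (config : List (String × List String)) : Option String :=
  let cfg := PySem.Dict.mk config
  let rank := [("LDAP_READONLY_GROUPS", 1), ("LDAP_USER_GROUPS", 2), ("LDAP_ADMIN_GROUPS", 3)].foldl
    (fun d p => pvAddTier d (cfg.getD p.1 []) p.2) PySem.Dict.empty
  let best := ad_groups.foldl (fun b g => max b (rank.getD g 0)) 0
  if best = 3 then some "admin"
  else if best = 2 then some "user"
  else if best = 1 then some "readonly"
  else none

-- ===== PRECONDITION & SPEC =====
def Spec_map_ad_groups_to_role_py (ad_groups : List String) (config : List (String × List String)) (out : Option String) : Prop := out = map_ad_groups_to_role_py_alt ad_groups config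
instance (ad_groups : List String) (config : List (String × List String)) (out : Option String) : Decidable (Spec_map_ad_groups_to_role_py ad_groups config out) := by unfold Spec_map_ad_groups_to_role_py; infer_instance

-- ===== CLAIM (what is proved, stated in full; the proofs are below) =====
def Claim_equal_map_ad_groups_to_role_py : Prop := ∀ (ad_groups : List String) (config : List (String × List String)), Dom_map_ad_groups_to_role_py ad_groups config → Spec_map_ad_groups_to_role_py ad_groups config (map_ad_groups_to_role_py ad_groups config)

-- ===== LEMMAS AND PROOFS =====

lemma pvFindIn_eq_any (gs grp : List String) : pvFindIn gs grp = gs.any grp.contains := by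
  induction gs with
  | nil => rfl
  | cons g t ih => by_cases h : grp.contains g <;> simp [pvFindIn, h, ih]

-- one tier fold: inserted keys are exactly pvClean of the tier, value = prio, overwriting the old dict
lemma pvAddTier_getD (l : List String) (d : PySem.Dict String Nat) (p : Nat) (key : String) :
    (pvAddTier d l p).getD key 0 =
      if (pvClean l).contains key then p else d.getD key 0 := by
  induction l generalizing d with
  | nil => simp [pvAddTier, pvClean]
  | cons g t ih =>
    by_cases hs : PySem.Str.strip g = ""
    · simp [pvAddTier, pvClean, hs] at ih ⊢
      exact ih d
    · simp only [pvAddTier, List.foldl_cons, if_neg hs] at ih ⊢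
      rw [ih, PySem.Dict.getD_insert]
      have hcl : pvClean (g :: t) = PySem.Str.strip g :: pvClean t := by simp [pvClean, hs]
      rw [hcl, List.contains_cons]
      by_cases hk : (pvClean t).contains key <;> by_cases he : key = PySem.Str.strip g <;>
        simp [hk, he]

-- the rank dict resolves each group to its highest-priority tier
lemma pvRank_getD (a u r : List String) (key : String) :
    (pvAddTier (pvAddTier (pvAddTier PySem.Dict.empty r 1) u 2) a 3).getD key 0 =
      if (pvClean a).contains key then 3
      else if (pvClean u).contains key then 2
      else if (pvClean r).contains key then 1 else 0 := by
  rw [pvAddTier_getD, pvAddTier_getD, pvAddTier_getD]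
  simp [PySem.Dict.getD_empty]

-- the max-fold over ad_groups computes the priority of the best-matching tier
lemma pvBest_fold (gs : List String) (v : String → Nat) (a u r : String → Bool)
    (hv : ∀ g, v g = if a g then 3 else if u g then 2 else if r g then 1 else 0)
    (b : Nat) :
    gs.foldl (fun m g => max m (v g)) b =
      max b (if gs.any a then 3 else if gs.any u then 2 else if gs.any r then 1 else 0) := by
  induction gs generalizing b with
  | nil => simp
  | cons g t ih =>
    simp only [List.foldl_cons, List.any_cons, ih]
    rw [hv g]
    by_cases ha : a g <;> by_cases hu : u g <;> by_cases hr : r g <;>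
      simp [ha, hu, hr] <;> split_ifs <;> omega

-- ===== VERDICT (by name: the statement is the Claim_ definition above) =====
theorem map_ad_groups_to_role_py_spec : Claim_equal_map_ad_groups_to_role_py := by
  intro ad_groups config _
  unfold Spec_map_ad_groups_to_role_py map_ad_groups_to_role_py map_ad_groups_to_role_py_alt
  simp only [List.foldl_cons, List.foldl_nil]
  set cfg := PySem.Dict.mk config
  set A := pvClean (cfg.getD "LDAP_ADMIN_GROUPS" [])
  set U := pvClean (cfg.getD "LDAP_USER_GROUPS" [])
  set R := pvClean (cfg.getD "LDAP_READONLY_GROUPS" [])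
  have hrank : ∀ key, (pvAddTier (pvAddTier (pvAddTier PySem.Dict.empty
      (cfg.getD "LDAP_READONLY_GROUPS" []) 1) (cfg.getD "LDAP_USER_GROUPS" []) 2)
      (cfg.getD "LDAP_ADMIN_GROUPS" []) 3).getD key 0 =
      if A.contains key then 3 else if U.contains key then 2 else if R.contains key then 1 else 0 :=
    fun key => pvRank_getD _ _ _ key
  simp only [hrank]
  rw [pvBest_fold ad_groups _ A.contains U.contains R.contains (fun g => rfl) 0]
  simp only [pvFindIn_eq_any, Nat.zero_max]
  by_cases hA : ad_groups.any A.contains <;> by_cases hU : ad_groups.any U.contains <;>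
    by_cases hR : ad_groups.any R.contains <;> simp [hA, hU, hR]
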